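-- pv_equiv track=rewrite | github.com/markbellingham/CryptoRansomware | transpositionCipher.py | transpositionEncrypt
-- ===== SOURCE A (Python) =====
-- def transpositionEncrypt(key, message):
--     # Each string in ciphertext represents a column in the grid.
--     ciphertext = [''] * key
--     returnText = ''
--
--     # Loop through each column in ciphertext.
--     for col in range(key):
--         pointer = col
--
--         # Keep looping until pointer goes past the length of the message.
--         while pointer < len(message):
--             # Place the character at pointer in message at the end of the
--             # current column in the ciphertext list.
--             ciphertext[col] += message[pointer]
--
--             # move pointer over
--             pointer += key
--
--     # Convert the ciphertext list into a single string value and return it.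
--     return ''.join(ciphertext)
-- ===== SOURCE B (Python) =====
-- def transpositionEncrypt(key, message):
--     # Single-pass round-robin scatter: distribute characters into column
--     # buckets with a cycling column counter, then join the buckets.
--     if key <= 0:
--         return ''
--     columns = [[] for _ in range(key)]
--     col = 0
--     for ch in message:
--         columns[col].append(ch)
--         col += 1
--         if col == key:
--             col = 0
--     return ''.join(''.join(c) for c in columns)
-- ===== Notes on version B (the rewrite author's own statement) =====
-- stated objective: alternative
-- what changed: Replaces A's outer loop over columns with an inner stride-by-key walk (and per-column string +=) by a single left-to-right pass over the message that scatters each character into one of key column buckets via a cycling column counter, then joins the buckets.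
import Mathlib
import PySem

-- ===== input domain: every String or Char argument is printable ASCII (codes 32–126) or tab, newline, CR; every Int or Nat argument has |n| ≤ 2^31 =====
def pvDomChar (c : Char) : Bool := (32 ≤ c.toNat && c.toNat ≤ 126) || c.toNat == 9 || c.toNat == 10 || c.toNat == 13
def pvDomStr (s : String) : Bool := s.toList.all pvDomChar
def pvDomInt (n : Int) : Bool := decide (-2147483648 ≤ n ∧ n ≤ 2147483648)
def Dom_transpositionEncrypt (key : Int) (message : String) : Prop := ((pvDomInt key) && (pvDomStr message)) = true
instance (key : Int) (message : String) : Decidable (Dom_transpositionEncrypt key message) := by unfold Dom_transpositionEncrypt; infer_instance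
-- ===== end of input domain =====

-- B replaces A's per-column strided gather (outer loop over columns, inner stride-by-key walk)
-- by ONE pass over the message that scatters each character into its column bucket with a
-- cycling column counter (objective: alternative decomposition, same cost).

-- ===== PORT A =====
/-- A's inner `while pointer < len(message)` loop for one column: append `message[pointer]`,
    then `pointer += key`.  `fuel` is only a totality bound (`len(message)+1` covers every
    reachable call, since inside the `for col in range(key)` loop `key ≥ 1`).  Whenever the
    branch is taken, `0 ≤ pointer < len(message)`, so `pyGet?` is `some` and the `.getD ' '`
    fallback is never the value — it is only there to make the function total. -/
def pvACol (chars : List Char) (key : Int) : Nat → Int → List Char → List Char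
  | 0, _, acc => acc
  | fuel+1, pointer, acc =>
    if pointer < (chars.length : Int) then
      pvACol chars key fuel (pointer + key) (acc ++ [(PySem.List.pyGet? chars pointer).getD ' '])
    else acc

/-- Port of A.  `ciphertext = [''] * key`; entry `col` is written only during iteration `col`
    of `for col in range(key)`, so the final list is exactly this map over `range(key)`
    (for `key ≤ 0` both the list and the range are empty).  `''.join` = `String.mk ∘ flatten`. -/
def transpositionEncrypt (key : Int) (message : String) : String :=
  String.mk ((PySem.List.pyRange 0 key 1).map
    (fun col => pvACol message.toList key (message.toList.length + 1) col [])).flatten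

-- ===== PORT B =====
/-- B's single pass: put `ch` into `columns[col]`, advance the cycling counter. -/
def pvBLoop (k : Nat) : List Char → Nat → List (List Char) → List (List Char)
  | [], _, columns => columns
  | ch :: rest, col, columns =>
      pvBLoop k rest (if col + 1 = k then 0 else col + 1) (columns.modify col (· ++ [ch]))

def transpositionEncrypt_alt (key : Int) (message : String) : String :=
  if key ≤ 0 then "" else
    String.mk (pvBLoop key.toNat message.toList 0 (List.replicate key.toNat [])).flatten

-- ===== PRECONDITION & SPEC =====
def Spec_transpositionEncrypt (key : Int) (message : String) (out : String) : Prop := out = transpositionEncrypt_alt key message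
instance (key : Int) (message : String) (out : String) : Decidable (Spec_transpositionEncrypt key message out) := by unfold Spec_transpositionEncrypt; infer_instance

-- ===== CLAIM (what is proved, stated in full; the proofs are below) =====
def Claim_equal_transpositionEncrypt : Prop := ∀ (key : Int) (message : String), Dom_transpositionEncrypt key message → Spec_transpositionEncrypt key message (transpositionEncrypt key message)

-- ===== LEMMAS AND PROOFS =====

/-- Every `k`-th character of `l` after first skipping `d`: the common shape of A's column
    `col` (skip `col`, then stride by `key`) and of B's bucket `j`. -/
def pvStride (k : Nat) : List Char → Nat → List Char
  | [], _ => []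
  | c :: rest, 0 => c :: pvStride k rest (k - 1)
  | _ :: rest, d+1 => pvStride k rest d

/-- Cyclic distance from counter value `c` to bucket `j` (both `< k`). -/
def pvDist (k c j : Nat) : Nat := if c ≤ j then j - c else j + k - c

lemma pvStride_eq_drop (k : Nat) :
    ∀ (l : List Char) (d : Nat), pvStride k l d = pvStride k (l.drop d) 0 := by
  intro l
  induction l with
  | nil => intro d; cases d <;> rfl
  | cons c rest ih =>
    intro d
    cases d with
    | zero => rfl
    | succ d => simpa [pvStride] using ih d

lemma pvACol_eq (chars : List Char) (key : Int) (hk : 1 ≤ key) :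
    ∀ (fuel p : Nat) (acc : List Char), chars.length ≤ p + fuel →
      pvACol chars key fuel (p : Int) acc = acc ++ pvStride key.toNat (chars.drop p) 0 := by
  intro fuel
  induction fuel with
  | zero =>
    intro p acc h
    have h' : chars.length ≤ p := by omega
    rw [List.drop_of_length_le h']
    simp [pvACol, pvStride]
  | succ fuel ih =>
    intro p acc h
    by_cases hp : (p : Int) < (chars.length : Int)
    · have hp' : p < chars.length := by exact_mod_cast hp
      have hkey : key = ((key.toNat : Nat) : Int) := by omega
      have hk1 : 1 ≤ key.toNat := by omega
      have hstep : (p : Int) + key = (((p + key.toNat : Nat)) : Int) := by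
        push_cast; omega
      rw [pvACol, if_pos hp, PySem.List.pyGet?_natCast, List.getElem?_eq_getElem hp',
        hstep, ih (p + key.toNat) _ (by omega)]
      rw [List.drop_eq_getElem_cons hp']
      show _ = acc ++ (chars[p] :: pvStride key.toNat (chars.drop (p+1)) (key.toNat - 1))
      have hsum : p + 1 + (key.toNat - 1) = p + key.toNat := by omega
      rw [pvStride_eq_drop key.toNat (List.drop (p+1) chars) (key.toNat - 1), List.drop_drop, hsum]
      simp
    · have hlen : chars.length ≤ p := by omega
      rw [List.drop_of_length_le hlen, pvACol, if_neg hp]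
      simp [pvStride]

lemma pvBLoop_eq (k : Nat) (hk : 1 ≤ k) :
    ∀ (chars : List Char) (c : Nat) (columns : List (List Char)),
      c < k → columns.length = k →
      pvBLoop k chars c columns =
        (List.range k).map (fun j => columns.getD j [] ++ pvStride k chars (pvDist k c j)) := by
  intro chars
  induction chars with
  | nil =>
    intro c columns hc hlen
    rw [pvBLoop]
    apply List.ext_getElem
    · simp [hlen]
    · intro i h1 h2
      have hik : i < k := by simpa [hlen] using h1
      simp [pvStride, List.getD, List.getElem?_eq_getElem h1]
  | cons ch rest ih =>
    intro c columns hc hlen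
    rw [pvBLoop,
      ih (if c + 1 = k then 0 else c + 1) _ (by split <;> omega) (by simp [hlen])]
    apply List.map_congr_left
    intro j hj
    have hjk : j < k := List.mem_range.mp hj
    have hjlen : j < columns.length := by omega
    have hgd : columns.getD j [] = columns[j] := List.getD_eq_getElem _ _ hjlen
    have hmod : (columns.modify c (· ++ [ch])).getD j [] =
        if c = j then columns[j] ++ [ch] else columns[j] := by
      rw [List.getD_eq_getElem _ [] (by simpa using hjlen), List.getElem_modify]
    by_cases hcj : c = j
    · subst hcj
      have hd0 : pvDist k c c = 0 := by unfold pvDist; simp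
      have hd1 : pvDist k (if c + 1 = k then 0 else c + 1) c = k - 1 := by
        unfold pvDist; split <;> split <;> omega
      rw [hmod, if_pos rfl, hd0, hd1, hgd]
      show (columns[c] ++ [ch]) ++ pvStride k rest (k-1) = columns[c] ++ pvStride k (ch :: rest) 0
      rw [List.append_assoc]
      rfl
    · have hd : pvDist k c j = pvDist k (if c + 1 = k then 0 else c + 1) j + 1 := by
        unfold pvDist; split <;> split <;> split <;> omega
      rw [hmod, if_neg hcj, hd, hgd]
      rfl

lemma pvFinal (key : Int) (hk : 1 ≤ key) (chars : List Char) :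
    (PySem.List.pyRange 0 key 1).map (fun col => pvACol chars key (chars.length + 1) col []) =
      pvBLoop key.toNat chars 0 (List.replicate key.toNat []) := by
  have hk1 : 1 ≤ key.toNat := by omega
  rw [pvBLoop_eq key.toNat hk1 chars 0 _ (by omega) (by simp)]
  rw [PySem.List.pyRange_one, List.map_map]
  have hkn : (key - 0).toNat = key.toNat := by omega
  rw [hkn]
  apply List.map_congr_left
  intro j hj
  have hjk : j < key.toNat := List.mem_range.mp hj
  show pvACol chars key (chars.length + 1) ((0 : Int) + (j : Int)) [] = _
  rw [zero_add, pvACol_eq chars key hk (chars.length + 1) j [] (by omega)]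
  have hrep : (List.replicate key.toNat ([] : List Char)).getD j [] = [] := by
    rw [List.getD_eq_getElem _ [] (by simpa using hjk)]; simp
  have hd : pvDist key.toNat 0 j = j := by unfold pvDist; simp
  simp only [List.nil_append]
  rw [hrep, hd, pvStride_eq_drop key.toNat chars j]
  simp

-- ===== VERDICT (by name: the statement is the Claim_ definition above) =====
theorem transpositionEncrypt_spec : Claim_equal_transpositionEncrypt := by
  intro key message _
  unfold Spec_transpositionEncrypt transpositionEncrypt transpositionEncrypt_alt
  by_cases hk : key ≤ 0
  · rw [if_pos hk, PySem.List.pyRange_one_eq_nil hk]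
    rfl
  · rw [if_neg hk, ← pvFinal key (by omega) message.toList]
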